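-- pv_equiv track=rewrite | github.com/nasgold/Rounder | data_collection_and_storage/averagedStatsAndInfo/calculateStatAvgs.py | getRowInfo
-- ===== SOURCE A (Python) =====
-- def getRowInfo(currentRow):
-- 	# Row info are the stats we won't average (see getIndexesNotToGetTheAverageFor to these stats)
--
-- 	currentRow = currentRow.split(', ')
--
-- 	statIndexesNotToAverage = getIndexesNotToGetTheAverageFor()
-- 	infoStats = []
-- 	for index in range(len(currentRow)):
-- 		if index in statIndexesNotToAverage:
-- 			infoStats.append(currentRow[index])
--
-- 	return infoStats
--
-- def getIndexesNotToGetTheAverageFor():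
--
-- 	# Not averaging index 0: gameNumber
-- 	# Not averaging index 1: date of the game
-- 	# Not averaging index 2: home or away
-- 	# Not averaging index 3: opponent
-- 	# Not averaging index 4: result of the game
-- 	# Not averaging index 5: the spread result
-- 	# Not averaging index 6: the spread
-- 	# Not averaging index 7: over under result
-- 	# Not averaging index 8: over under line
-- 	# Not averaging index 9: was this game a back to back?
--
-- 	return [0, 1, 2, 3, 4, 5, 6, 7, 8, 9]
-- ===== SOURCE B (Python) =====
-- def getRowInfo(currentRow):
--     # The non-averaged stats are exactly the first 10 comma-separated fields.
--     return currentRow.split(', ')[:10]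
-- ===== Notes on version B (the rewrite author's own statement) =====
-- stated objective: simpler
-- what changed: Replaced the helper constant list, the index loop over every column and the per-index membership test with a single split followed by a [:10] slice.
import Mathlib
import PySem

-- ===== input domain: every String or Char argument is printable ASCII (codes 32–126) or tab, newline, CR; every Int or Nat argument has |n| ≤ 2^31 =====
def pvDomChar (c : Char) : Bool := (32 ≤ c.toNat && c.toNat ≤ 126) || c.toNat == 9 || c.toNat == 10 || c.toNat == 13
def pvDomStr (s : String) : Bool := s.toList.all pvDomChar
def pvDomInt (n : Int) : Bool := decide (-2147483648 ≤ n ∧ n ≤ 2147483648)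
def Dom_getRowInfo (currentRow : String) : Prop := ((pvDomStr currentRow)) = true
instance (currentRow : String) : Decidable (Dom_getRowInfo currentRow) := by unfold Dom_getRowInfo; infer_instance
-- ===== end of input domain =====

-- B replaces A's helper constant, accumulator and per-column membership loop by a single [:10] slice (simpler).

-- ===== PORT A =====
-- s.split(', ') with a non-empty separator always returns; Str.split? is none only for sep = "", so getD is exact here
def pvSplitRow (s : String) : List String := (PySem.Str.split? s ", ").getD []

def getIndexesNotToGetTheAverageFor : List Int := [0, 1, 2, 3, 4, 5, 6, 7, 8, 9]

def getRowInfo (currentRow : String) : List String :=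
  let row := pvSplitRow currentRow
  let statIndexesNotToAverage := getIndexesNotToGetTheAverageFor
  (PySem.List.pyRange 0 row.length 1).foldl
    (fun infoStats index =>
      if index ∈ statIndexesNotToAverage then
        infoStats ++ [PySem.List.pyGetD row index ""]
      else infoStats) []

-- ===== PORT B =====
def getRowInfo_alt (currentRow : String) : List String :=
  PySem.List.slice (pvSplitRow currentRow) none (some 10)

-- ===== PRECONDITION & SPEC =====
def Spec_getRowInfo (currentRow : String) (out : List String) : Prop := out = getRowInfo_alt currentRow
instance (currentRow : String) (out : List String) : Decidable (Spec_getRowInfo currentRow out) := by unfold Spec_getRowInfo; infer_instance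

-- ===== CLAIM (what is proved, stated in full; the proofs are below) =====
def Claim_equal_getRowInfo : Prop := ∀ (currentRow : String), Dom_getRowInfo currentRow → Spec_getRowInfo currentRow (getRowInfo currentRow)

-- ===== LEMMAS AND PROOFS =====

lemma mem_indexes_iff (i : Int) : i ∈ getIndexesNotToGetTheAverageFor ↔ 0 ≤ i ∧ i < 10 := by
  simp [getIndexesNotToGetTheAverageFor]
  omega

lemma loop_eq_take (xs : List String) :
    (PySem.List.pyRange 0 xs.length 1).foldl
      (fun infoStats index =>
        if index ∈ getIndexesNotToGetTheAverageFor then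
          infoStats ++ [PySem.List.pyGetD xs index ""]
        else infoStats) [] = xs.take 10 := by
  by_cases h : xs.length ≤ 10
  · -- the whole range passes the membership test, so the loop copies xs, and take 10 is xs too
    rw [PySem.List.foldl_congr_mem _ _
        (fun infoStats index => infoStats ++ [PySem.List.pyGetD xs index ""]) []
        (by
          intro acc i hi
          rw [PySem.List.mem_pyRange_one] at hi
          show (if i ∈ getIndexesNotToGetTheAverageFor
              then acc ++ [PySem.List.pyGetD xs i ""] else acc) = _
          rw [if_pos ((mem_indexes_iff i).2 ⟨hi.1, by omega⟩)])]
    rw [PySem.List.foldl_append_singleton_eq_map (fun index => PySem.List.pyGetD xs index "")]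
    rw [PySem.List.map_pyGetD_pyRange_zero', List.take_of_length_le h, List.nil_append]
  · -- split the range at 10: indices < 10 pass, indices ≥ 10 fail
    rw [PySem.List.pyRange_one_append 0 10 xs.length (by omega) (by omega), List.foldl_append]
    rw [PySem.List.foldl_congr_mem _ _
        (fun infoStats index => infoStats ++ [PySem.List.pyGetD xs index ""]) []
        (by
          intro acc i hi
          rw [PySem.List.mem_pyRange_one] at hi
          show (if i ∈ getIndexesNotToGetTheAverageFor
              then acc ++ [PySem.List.pyGetD xs i ""] else acc) = _
          rw [if_pos ((mem_indexes_iff i).2 ⟨hi.1, hi.2⟩)])]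
    rw [PySem.List.foldl_append_singleton_eq_map (fun index => PySem.List.pyGetD xs index "")]
    rw [PySem.List.foldl_congr_mem _ _ (fun infoStats _ => infoStats) _
        (by
          intro acc i hi
          rw [PySem.List.mem_pyRange_one] at hi
          show (if i ∈ getIndexesNotToGetTheAverageFor
              then acc ++ [PySem.List.pyGetD xs i ""] else acc) = acc
          rw [if_neg (by rw [mem_indexes_iff]; omega)])]
    rw [List.foldl_fixed, List.nil_append]
    -- remaining: (pyRange 0 10).map (fun i => xs[i]) = xs.take 10
    have h10 : ((xs.take 10).length : Int) = 10 := by simp [List.length_take]; omega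
    have hmap := PySem.List.map_pyGetD_pyRange_zero' (xs.take 10) ""
    rw [h10] at hmap
    rw [← hmap]
    apply List.map_congr_left
    intro i hi
    rw [PySem.List.mem_pyRange_one] at hi
    rw [PySem.List.pyGetD_eq_getElem _ _ hi.1 (by omega),
        PySem.List.pyGetD_eq_getElem _ _ hi.1 (by simp [List.length_take]; omega),
        List.getElem_take]

-- ===== VERDICT (by name: the statement is the Claim_ definition above) =====
theorem getRowInfo_spec : Claim_equal_getRowInfo := by
  intro currentRow _
  unfold Spec_getRowInfo getRowInfo getRowInfo_alt
  rw [loop_eq_take]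
  rw [show ((10 : Int)) = ((10 : Nat) : Int) by norm_num, PySem.List.slice_to_natCast]
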